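-- pv_equiv track=rewrite | github.com/oknott14/DSA | leetcode/contacts/test_contacts.py | contacts
-- ===== SOURCE A (Python) =====
-- from typing import Dict, List, Tuple
--
-- class Trie:
--     def __init__(self, num_below: int = 0):
--         self.next: Dict[str, Trie] = {}
--         self.num_below = num_below
--
--     def add(self, s: str):
--         curr = self
--         idx = 0
--
--         while idx < len(s) and s[idx] in curr.next:
--             curr.num_below += 1
--             curr = curr.next[s[idx]]
--             idx += 1
--
--         curr.num_below += 1
--
--         while idx < len(s):
--             curr.next[s[idx]] = Trie(1)
--             curr = curr.next[s[idx]]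
--             idx += 1
--
--     def search(self, s: str) -> int:
--         curr = self
--
--         for char in s:
--             if char in curr.next:
--                 curr = curr.next[char]
--             else:
--                 return 0
--
--         return curr.num_below
--
-- def contacts(queries: List[Tuple[str, str]]) -> List[int]:
--     # Write your code here
--     trie = Trie()
--     output = []
--     for action, inp in queries:
--         if action == "add":
--             trie.add(inp)
--         else:
--             output.append(trie.search(inp))
--
--     return output
-- ===== SOURCE B (Python) =====
-- from typing import List, Tuple
--
-- def contacts(queries: List[Tuple[str, str]]) -> List[int]:
--     counts = {}
--     output = []
--     for action, inp in queries:
--         if action == "add":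
--             for i in range(len(inp) + 1):
--                 p = inp[:i]
--                 counts[p] = counts.get(p, 0) + 1
--         else:
--             output.append(counts.get(inp, 0))
--     return output
-- ===== Notes on version B (the rewrite author's own statement) =====
-- stated objective: simpler
-- what changed: Replaces the linked Trie class (node objects with child dicts, pointer-walking add/search loops) by a single flat dict mapping every prefix string to its count; a find query is one dict lookup.
import Mathlib
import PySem

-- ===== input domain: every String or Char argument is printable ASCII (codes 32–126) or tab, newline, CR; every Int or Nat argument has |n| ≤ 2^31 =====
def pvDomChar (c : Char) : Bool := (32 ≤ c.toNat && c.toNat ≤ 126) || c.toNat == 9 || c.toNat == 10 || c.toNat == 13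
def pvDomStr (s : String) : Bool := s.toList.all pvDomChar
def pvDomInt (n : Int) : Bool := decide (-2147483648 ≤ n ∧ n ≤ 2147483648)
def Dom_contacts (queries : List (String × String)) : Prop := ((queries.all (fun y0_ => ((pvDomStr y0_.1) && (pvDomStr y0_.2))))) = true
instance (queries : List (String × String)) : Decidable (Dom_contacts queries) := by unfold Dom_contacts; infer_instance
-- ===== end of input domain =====

-- B replaces A's linked Trie (node objects with child dicts, pointer-walking add/search
-- loops) by one flat dict from prefix string to count; objective: simpler (no speed claim).

-- ===== PORT A =====
-- A's Trie class: a node holds num_below and a child map keyed by the 1-char strings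
-- s[idx] (ported as Char). The mutual pair encodes the node/child-list structure
-- (a nested inductive is not allowed); the child dict (insertion order, first-match
-- lookup, append of new keys) is the PChildren list.
mutual
inductive PTrie : Type
  | mk : Int → PChildren → PTrie
  deriving Repr
inductive PChildren : Type
  | nil : PChildren
  | cons : Char → PTrie → PChildren → PChildren
  deriving Repr
end

def PChildren.find? : PChildren → Char → Option PTrie
  | .nil, _ => none
  | .cons c t rest, a => if c = a then some t else rest.find? a
def PChildren.replace : PChildren → Char → PTrie → PChildren
  | .nil, _, _ => .nil
  | .cons c t rest, a, u => if c = a then .cons c u rest else .cons c t (rest.replace a u)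
def PChildren.append : PChildren → Char → PTrie → PChildren
  | .nil, a, u => .cons a u .nil
  | .cons c t rest, a, u => .cons c t (rest.append a u)
def PTrie.fresh : List Char → PTrie
  | [] => .mk 1 .nil
  | c :: cs => .mk 1 (.cons c (PTrie.fresh cs) .nil)
def PTrie.add : PTrie → List Char → PTrie
  | .mk n ch, [] => .mk (n + 1) ch
  | .mk n ch, c :: cs =>
    match ch.find? c with
    | some t => .mk (n + 1) (ch.replace c (t.add cs))
    | none => .mk (n + 1) (ch.append c (PTrie.fresh cs))
def PTrie.search : PTrie → List Char → Int
  | .mk n _, [] => n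
  | .mk _ ch, c :: cs =>
    match ch.find? c with
    | some t => t.search cs
    | none => 0


def contacts (queries : List (String × String)) : List Int :=
  (queries.foldl
    (fun (st : PTrie × List Int) q =>
      if q.1 = "add" then (st.1.add q.2.toList, st.2)
      else (st.1, st.2 ++ [st.1.search q.2.toList]))
    (PTrie.mk 0 .nil, [])).2

-- ===== PORT B =====
-- B's inner loop: for i in range(len(s) + 1): counts[s[:i]] = counts.get(s[:i], 0) + 1
def bumpPrefixes (counts : PySem.Dict String Int) (s : String) : PySem.Dict String Int :=
  (PySem.List.pyRange 0 (PySem.Str.len s + 1) 1).foldl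
    (fun d i =>
      let p := PySem.Str.slice s none (some i)
      d.insert p (d.getD p 0 + 1))
    counts

def contacts_alt (queries : List (String × String)) : List Int :=
  (queries.foldl
    (fun (st : PySem.Dict String Int × List Int) q =>
      if q.1 = "add" then (bumpPrefixes st.1 q.2, st.2)
      else (st.1, st.2 ++ [st.1.getD q.2 0]))
    (PySem.Dict.empty, [])).2

-- ===== PRECONDITION & SPEC =====
def Spec_contacts (queries : List (String × String)) (out : List Int) : Prop := out = contacts_alt queries
instance (queries : List (String × String)) (out : List Int) : Decidable (Spec_contacts queries out) := by unfold Spec_contacts; infer_instance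

-- ===== CLAIM (what is proved, stated in full; the proofs are below) =====
def Claim_equal_contacts : Prop := ∀ (queries : List (String × String)), Dom_contacts queries → Spec_contacts queries (contacts queries)

-- ===== LEMMAS AND PROOFS =====

theorem find?_replace : ∀ (ch : PChildren) (a c : Char) (u t0 : PTrie),
    ch.find? a = some t0 →
    (ch.replace a u).find? c = if c = a then some u else ch.find? c
  | .nil, a, c, u, t0, h => by simp [PChildren.find?] at h
  | .cons c' t rest, a, c, u, t0, h => by
    simp only [PChildren.find?] at h
    simp only [PChildren.replace, PChildren.find?]
    split_ifs at h ⊢ <;> first | rfl | simp_all [PChildren.find?, find?_replace rest a c u t0, find?_replace rest a a u t0]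

theorem find?_append : ∀ (ch : PChildren) (a c : Char) (u : PTrie),
    ch.find? a = none →
    (ch.append a u).find? c = if c = a then some u else ch.find? c
  | .nil, a, c, u, _ => by
    simp only [PChildren.append, PChildren.find?]
    by_cases hca : a = c
    · subst hca; simp
    · rw [if_neg hca, if_neg (fun h' : c = a => hca h'.symm)]
  | .cons c' t rest, a, c, u, h => by
    simp only [PChildren.find?] at h
    by_cases hc'a : c' = a
    · simp [hc'a] at h
    · rw [if_neg hc'a] at h
      simp only [PChildren.append, PChildren.find?]
      by_cases hcc : c' = c
      · subst hcc
        rw [if_pos rfl, if_neg hc'a, if_pos rfl]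
      · rw [if_neg hcc, if_neg hcc, find?_append rest a c u h]

theorem search_fresh (cs p : List Char) :
    (PTrie.fresh cs).search p = if p <+: cs then 1 else 0 := by
  induction cs generalizing p with
  | nil =>
    cases p with
    | nil => simp [PTrie.fresh, PTrie.search]
    | cons c p' => simp [PTrie.fresh, PTrie.search, PChildren.find?]
  | cons c cs' ih =>
    cases p with
    | nil => simp [PTrie.fresh, PTrie.search]
    | cons d p' =>
      simp only [PTrie.fresh, PTrie.search, PChildren.find?]
      by_cases hdc : c = d
      · subst hdc
        simp [ih p', List.cons_prefix_cons]
      · rw [if_neg hdc,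
          if_neg (by rw [List.cons_prefix_cons]; rintro ⟨h1, _⟩; exact hdc h1.symm)]

theorem search_add (cs : List Char) (t : PTrie) (p : List Char) :
    (t.add cs).search p = t.search p + (if p <+: cs then 1 else 0) := by
  induction cs generalizing t p with
  | nil =>
    obtain ⟨n, ch⟩ := t
    cases p with
    | nil => simp [PTrie.add, PTrie.search]
    | cons c p' =>
      simp only [PTrie.add, PTrie.search]
      cases hf : ch.find? c <;> simp
  | cons a cs' ih =>
    obtain ⟨n, ch⟩ := t
    cases hf : ch.find? a with
    | some t0 =>
      cases p with
      | nil => simp [PTrie.add, PTrie.search, hf]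
      | cons c p' =>
        simp only [PTrie.add, PTrie.search, hf]
        rw [find?_replace ch a c (t0.add cs') t0 hf]
        by_cases hca : c = a
        · subst hca
          simp [hf, ih, List.cons_prefix_cons]
        · rw [if_neg hca,
            if_neg (by rw [List.cons_prefix_cons]; rintro ⟨h1, _⟩; exact hca h1)]
          cases ch.find? c <;> simp
    | none =>
      cases p with
      | nil => simp [PTrie.add, PTrie.search, hf]
      | cons c p' =>
        simp only [PTrie.add, PTrie.search, hf]
        rw [find?_append ch a c (PTrie.fresh cs') hf]
        by_cases hca : c = a
        · subst hca
          simp [hf, search_fresh, List.cons_prefix_cons]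
        · rw [if_neg hca,
            if_neg (by rw [List.cons_prefix_cons]; rintro ⟨h1, _⟩; exact hca h1)]
          cases ch.find? c <;> simp

theorem toList_slice_to_nat (s : String) (k : Nat) :
    (PySem.Str.slice s none (some (k : Int))).toList = s.toList.take k := by
  rw [PySem.Str.toList_slice, PySem.Chars.slice_eq_listSlice,
    PySem.List.slice_to _ (by positivity : (0 : Int) ≤ (k : Int))]
  simp


def prefList (s : String) : List String :=
  (List.range (s.length + 1)).map (fun k : Nat => PySem.Str.slice s none (some (k : Int)))

theorem bumpPrefixes_eq_foldl (d : PySem.Dict String Int) (s : String) :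
    bumpPrefixes d s = (prefList s).foldl (fun d x => d.insert x (d.getD x 0 + 1)) d := by
  unfold bumpPrefixes prefList
  rw [PySem.List.pyRange_one, List.foldl_map, List.foldl_map]
  have hn : (PySem.Str.len s + 1 - 0).toNat = s.length + 1 := by
    simp [PySem.Str.len_eq]
  rw [hn]
  simp

theorem mem_prefList (s p : String) :
    p ∈ prefList s ↔ p.toList <+: s.toList := by
  unfold prefList
  simp only [List.mem_map, List.mem_range]
  constructor
  · rintro ⟨k, _, rfl⟩
    rw [toList_slice_to_nat]
    exact List.take_prefix k s.toList
  · intro hp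
    refine ⟨p.toList.length, ?_, ?_⟩
    · have := hp.length_le
      rw [← String.length_toList]; omega
    · apply String.toList_inj.mp
      rw [toList_slice_to_nat]
      exact (List.prefix_iff_eq_take.mp hp).symm

theorem nodup_prefList (s : String) : (prefList s).Nodup := by
  unfold prefList
  refine List.nodup_range.map_on ?_
  intro i hi j hj hij
  have h1 : (PySem.Str.slice s none (some (i : Int))).toList.length = i := by
    rw [toList_slice_to_nat]
    simp only [List.mem_range] at hi
    simp [String.length_toList]; omega
  have h2 : (PySem.Str.slice s none (some (j : Int))).toList.length = j := by
    rw [toList_slice_to_nat]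
    simp only [List.mem_range] at hj
    simp [String.length_toList]; omega
  rw [hij] at h1; omega

theorem getD_bumpPrefixes (d : PySem.Dict String Int) (s p : String) :
    (bumpPrefixes d s).getD p 0 = d.getD p 0 + (if p.toList <+: s.toList then 1 else 0) := by
  rw [bumpPrefixes_eq_foldl, PySem.Dict.getD_foldl_insert_add_one]
  congr 1
  by_cases h : p.toList <+: s.toList
  · rw [if_pos h]
    exact_mod_cast List.count_eq_one_of_mem (nodup_prefList s) ((mem_prefList s p).mpr h)
  · rw [if_neg h]
    exact_mod_cast List.count_eq_zero.mpr (fun hm => h ((mem_prefList s p).mp hm))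

-- the invariant tying A's trie to B's prefix-count dict
def TrieCounts (t : PTrie) (d : PySem.Dict String Int) : Prop :=
  ∀ p : String, t.search p.toList = d.getD p 0

theorem trieCounts_init : TrieCounts (PTrie.mk 0 .nil) PySem.Dict.empty := by
  intro p
  cases hp : p.toList with
  | nil => simp [PTrie.search, PySem.Dict.getD_empty]
  | cons c cs => simp [PTrie.search, PChildren.find?, PySem.Dict.getD_empty]

theorem trieCounts_add (t : PTrie) (d : PySem.Dict String Int) (s : String)
    (h : TrieCounts t d) : TrieCounts (t.add s.toList) (bumpPrefixes d s) := by
  intro p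
  rw [search_add, getD_bumpPrefixes, h p]

theorem loop_eq (qs : List (String × String)) (t : PTrie) (d : PySem.Dict String Int)
    (out : List Int) (h : TrieCounts t d) :
    (qs.foldl
      (fun (st : PTrie × List Int) q =>
        if q.1 = "add" then (st.1.add q.2.toList, st.2)
        else (st.1, st.2 ++ [st.1.search q.2.toList]))
      (t, out)).2 =
    (qs.foldl
      (fun (st : PySem.Dict String Int × List Int) q =>
        if q.1 = "add" then (bumpPrefixes st.1 q.2, st.2)
        else (st.1, st.2 ++ [st.1.getD q.2 0]))
      (d, out)).2 := by
  induction qs generalizing t d out with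
  | nil => rfl
  | cons q qs ih =>
    simp only [List.foldl_cons]
    by_cases hq : q.1 = "add"
    · simp only [if_pos hq]
      exact ih _ _ _ (trieCounts_add t d q.2 h)
    · simp only [if_neg hq, h q.2]
      exact ih _ _ _ h

-- ===== VERDICT (by name: the statement is the Claim_ definition above) =====
theorem contacts_spec : Claim_equal_contacts := by
  intro queries _
  unfold Spec_contacts contacts contacts_alt
  exact loop_eq queries _ _ [] trieCounts_init
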